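-- pv_equiv track=rewrite | github.com/yukikitayama/leetcode-python | daily-challenge/daily_1652_defuse_the_bomb.py | decrypt1
-- ===== SOURCE A (Python) =====
-- from typing import List
--
-- def decrypt1(code: List[int], k: int) -> List[int]:
--     ans = [0] * len(code)
--
--     if k == 0:
--         return ans
--
--     for i in range(len(code)):
--
--         if k > 0:
--             for j in range(i + 1, i + 1 + k):
--                 ans[i] += code[j % len(code)]
--         else:
--             for j in range(i - 1, i - 1 + k, -1):
--                 if j < 0:
--                     j += len(code)
--                 ans[i] += code[j]
--
--     return ans
-- ===== SOURCE B (Python) =====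
-- from typing import List
--
-- def decrypt1(code: List[int], k: int) -> List[int]:
--     # Sliding window with a running sum; the first window is computed by divmod
--     # (full cycles contribute sum(code) each), so the whole thing is O(n).
--     n = len(code)
--     if n == 0 or k == 0:
--         return [0] * n
--     m = abs(k)
--     lo = 1 if k > 0 else k
--     hi = lo + m - 1
--     q, r = divmod(m, n)
--     s = q * sum(code) + sum(code[(lo + t) % n] for t in range(r))
--     ans = []
--     for i in range(n):
--         ans.append(s)
--         s += code[(i + hi + 1) % n] - code[(i + lo) % n]
--     return ans
-- ===== Notes on version B (the rewrite author's own statement) =====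
-- stated objective: faster
-- what changed: Replaced the per-index inner loop over k neighbors by a single sliding window with a running sum (compute the first window once, then update it in O(1) per index).
import Mathlib
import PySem

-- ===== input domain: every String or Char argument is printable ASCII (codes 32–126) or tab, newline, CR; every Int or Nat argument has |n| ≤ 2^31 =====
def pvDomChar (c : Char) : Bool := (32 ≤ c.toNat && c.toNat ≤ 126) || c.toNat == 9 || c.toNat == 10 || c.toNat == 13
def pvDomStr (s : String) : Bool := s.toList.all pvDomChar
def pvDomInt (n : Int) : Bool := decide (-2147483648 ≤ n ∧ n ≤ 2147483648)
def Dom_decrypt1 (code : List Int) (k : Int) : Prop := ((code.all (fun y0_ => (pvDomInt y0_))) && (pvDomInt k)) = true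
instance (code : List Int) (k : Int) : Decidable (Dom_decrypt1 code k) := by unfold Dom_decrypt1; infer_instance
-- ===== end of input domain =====

-- B replaces A's per-index O(|k|) inner loop by a sliding window with a running sum (first window by divmod); equivalence is proved on Pre_ (outside it A raises IndexError).

-- ===== PORT A =====
def decrypt1 (code : List Int) (k : Int) : List Int :=
  if k = 0 then List.replicate code.length 0
  else
    (PySem.List.pyRange 0 (code.length : Int) 1).foldl (fun ans i =>
      if k > 0 then
        (PySem.List.pyRange (i + 1) (i + 1 + k) 1).foldl (fun a j =>
          PySem.List.pySetD a i (PySem.List.pyGetD a i 0 +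
            PySem.List.pyGetD code (PySem.Int.mod j (code.length : Int)) 0)) ans
      else
        (PySem.List.pyRange (i - 1) (i - 1 + k) (-1)).foldl (fun a j =>
          let j' := if j < 0 then j + (code.length : Int) else j
          PySem.List.pySetD a i (PySem.List.pyGetD a i 0 +
            PySem.List.pyGetD code j' 0)) ans) (List.replicate code.length 0)

-- ===== PORT B =====
-- Source B's ans-building loop: running sum s, updated in O(1) per index
def decrypt1AltGo (code : List Int) (lo hi s : Int) : List Int :=
  ((PySem.List.pyRange 0 (code.length : Int) 1).foldl
    (fun (p : List Int × Int) i =>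
      (p.1 ++ [p.2], p.2 + PySem.List.pyGetD code (PySem.Int.mod (i + hi + 1) (code.length : Int)) 0
                         - PySem.List.pyGetD code (PySem.Int.mod (i + lo) (code.length : Int)) 0))
    ([], s)).1

-- Source B after lo is chosen: hi = lo + m - 1, the divmod first-window sum, then the loop
def decrypt1AltFrom (code : List Int) (m lo : Int) : List Int :=
  decrypt1AltGo code lo (lo + m - 1)
    (PySem.Int.floordiv m (code.length : Int) * code.sum +
     ((PySem.List.pyRange 0 (PySem.Int.mod m (code.length : Int)) 1).map
        (fun t => PySem.List.pyGetD code (PySem.Int.mod (lo + t) (code.length : Int)) 0)).sum)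

def decrypt1_alt (code : List Int) (k : Int) : List Int :=
  if code.length = 0 ∨ k = 0 then List.replicate code.length 0
  else decrypt1AltFrom code |k| (if k > 0 then 1 else k)

-- ===== PRECONDITION & SPEC =====
-- Pre_ excludes exactly the inputs on which A raises IndexError (its one-shot negative-index
-- adjustment under-corrects): non-empty code with k < -2*len(code); B returns normally there.
def Pre_decrypt1 (code : List Int) (k : Int) : Prop := code = [] ∨ -2 * (code.length : Int) ≤ k
instance (code : List Int) (k : Int) : Decidable (Pre_decrypt1 code k) := by unfold Pre_decrypt1; infer_instance
def pvWitness_decrypt1 : List Int × Int := ([1, 2, 3, 4], -3)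

def Spec_decrypt1 (code : List Int) (k : Int) (out : List Int) : Prop := out = decrypt1_alt code k
instance (code : List Int) (k : Int) (out : List Int) : Decidable (Spec_decrypt1 code k out) := by unfold Spec_decrypt1; infer_instance

-- ===== CLAIM (what is proved, stated in full; the proofs are below) =====
def Claim_equal_decrypt1 : Prop := ∀ (code : List Int) (k : Int), Dom_decrypt1 code k → Pre_decrypt1 code k → Spec_decrypt1 code k (decrypt1 code k)

-- ===== LEMMAS AND PROOFS =====

-- code[j mod n]: the one value both programs add for offset j
def pvTerm (code : List Int) (j : Int) : Int :=
  PySem.List.pyGetD code (PySem.Int.mod j (code.length : Int)) 0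

-- circular window sum for index i, offsets lo..hi
def pvW (code : List Int) (lo hi i : Int) : Int :=
  ((PySem.List.pyRange (i + lo) (i + hi + 1) 1).map (pvTerm code)).sum

lemma pvGetD_shift (code : List Int) (m : Int) (h0 : 0 ≤ m) (h : m < (code.length : Int)) :
    PySem.List.pyGetD code (m - (code.length : Int)) 0 = PySem.List.pyGetD code m 0 := by
  simp only [PySem.List.pyGetD, PySem.List.pyGet?, PySem.List.pyIdx?]
  split_ifs with a b c <;> try omega
  have : code.length - (-(m - (code.length : Int))).toNat = m.toNat := by omega
  rw [this]

-- A's "if j < 0: j += n; code[j]" equals code[j mod n] whenever -2n ≤ j < n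
lemma pvTerm_adjust (code : List Int) (j : Int)
    (h1 : -2 * (code.length : Int) ≤ j) (h2 : j < (code.length : Int)) :
    PySem.List.pyGetD code (if j < 0 then j + (code.length : Int) else j) 0 = pvTerm code j := by
  have hn : 0 < (code.length : Int) := by omega
  unfold pvTerm
  by_cases hj : j < 0
  · rw [if_pos hj]
    by_cases hj2 : -(code.length : Int) ≤ j
    · have hmod : PySem.Int.mod j (code.length : Int) = j + (code.length : Int) := by
        rw [PySem.Int.mod_eq_emod_of_pos hn]
        have h1' := Int.add_mul_emod_self_left (a := j) (b := (code.length : Int)) (c := 1)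
        rw [mul_one] at h1'
        rw [← h1', Int.emod_eq_of_lt (by omega) (by omega)]
      rw [hmod]
    · have hmod : PySem.Int.mod j (code.length : Int) = j + 2 * (code.length : Int) := by
        rw [PySem.Int.mod_eq_emod_of_pos hn]
        have h2' := Int.add_mul_emod_self_left (a := j) (b := (code.length : Int)) (c := 2)
        rw [← h2', Int.emod_eq_of_lt (by omega) (by omega)]
        ring
      rw [hmod]
      have hs := pvGetD_shift code (j + 2 * (code.length : Int)) (by omega) (by omega)
      have harg : j + 2 * (code.length : Int) - (code.length : Int) = j + (code.length : Int) := by ring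
      rw [harg] at hs
      exact hs
  · rw [if_neg hj]
    rw [PySem.Int.mod_eq_emod_of_pos hn, Int.emod_eq_of_lt (by omega) h2]

-- repeated "ans[i] += g j" over a list of j's is one set of the accumulated sum
lemma pvInnerSet (g : Int → Int) (i : Int) :
    ∀ (L : List Int) (ans : List Int), 0 ≤ i → i < (ans.length : Int) →
    L.foldl (fun a j => PySem.List.pySetD a i (PySem.List.pyGetD a i 0 + g j)) ans
      = PySem.List.pySetD ans i (PySem.List.pyGetD ans i 0 + (L.map g).sum) := by
  intro L
  induction L with
  | nil =>
    intro ans h0 h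
    simp only [List.foldl_nil, List.map_nil, List.sum_nil, add_zero]
    rw [PySem.List.pySetD_of_nonneg _ _ h0, PySem.List.pyGetD_eq_getElem _ _ h0 h]
    simp
  | cons x L ih =>
    intro ans h0 h
    simp only [List.foldl_cons, List.map_cons, List.sum_cons]
    have hlen : i < ((PySem.List.pySetD ans i (PySem.List.pyGetD ans i 0 + g x)).length : Int) := by
      rw [PySem.List.pySetD_of_nonneg _ _ h0]
      simpa using h
    rw [ih _ h0 hlen]
    have h1 : PySem.List.pyGetD (PySem.List.pySetD ans i (PySem.List.pyGetD ans i 0 + g x)) i 0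
        = PySem.List.pyGetD ans i 0 + g x := by
      have hb : i < (((ans.set i.toNat (PySem.List.pyGetD ans i 0 + g x))).length : Int) := by
        simpa using h
      rw [PySem.List.pySetD_of_nonneg _ _ h0, PySem.List.pyGetD_eq_getElem _ _ h0 hb,
          List.getElem_set_self]
    have h2 : ∀ v, PySem.List.pySetD (PySem.List.pySetD ans i (PySem.List.pyGetD ans i 0 + g x)) i v
        = PySem.List.pySetD ans i v := by
      intro v
      rw [PySem.List.pySetD_of_nonneg _ _ h0, PySem.List.pySetD_of_nonneg _ _ h0,
          PySem.List.pySetD_of_nonneg _ _ h0, List.set_set]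
    rw [h1, h2]
    congr 1
    ring

-- filling a zero array position-by-position yields the map
lemma pvSetFoldMap (S : Int → Int) (F : List Int → Int → List Int) (n : Nat)
    (hF : ∀ (a : List Int) (i : Int), a.length = n → 0 ≤ i → i < (n : Int) →
          F a i = PySem.List.pySetD a i (PySem.List.pyGetD a i 0 + S i)) :
    ∀ (m : Nat), m ≤ n →
    (PySem.List.pyRange 0 (m : Int) 1).foldl F (List.replicate n (0 : Int))
      = (PySem.List.pyRange 0 (m : Int) 1).map S ++ List.replicate (n - m) 0 := by
  intro m
  induction m with
  | zero =>
    intro _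
    simp [PySem.List.pyRange_one_eq_nil (le_refl (0 : Int))]
  | succ m ih =>
    intro hm
    have hcast : ((m + 1 : Nat) : Int) = (m : Int) + 1 := by push_cast; ring
    rw [hcast, PySem.List.pyRange_one_succ_right (by omega), List.foldl_append, List.map_append,
        ih (by omega)]
    set P := (PySem.List.pyRange 0 (m : Int) 1).map S ++ List.replicate (n - m) (0 : Int) with hP
    have hlenmap : ((PySem.List.pyRange 0 (m : Int) 1).map S).length = m := by
      simp [PySem.List.length_pyRange_one]
    have hlen : P.length = n := by
      simp [hP, hlenmap]; omega
    simp only [List.foldl_cons, List.foldl_nil, List.map_cons, List.map_nil]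
    rw [hF P (m : Int) hlen (by omega) (by exact_mod_cast (by omega : m < n))]
    have hgetP : PySem.List.pyGetD P (m : Int) 0 = 0 := by
      rw [PySem.List.pyGetD_eq_getElem _ _ (by omega)
            (by rw [hlen]; exact_mod_cast (by omega : m < n))]
      simp only [Int.toNat_natCast, hP]
      rw [List.getElem_append_right (by omega)]
      simp [hlenmap]
    rw [hgetP, PySem.List.pySetD_of_nonneg _ _ (by omega)]
    simp only [Int.toNat_natCast, hP]
    rw [List.set_append_right _ _ (by omega)]
    have hrep : List.replicate (n - m) (0 : Int) = 0 :: List.replicate (n - m - 1) 0 := by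
      have h1 : n - m = (n - m - 1) + 1 := by omega
      conv_lhs => rw [h1]
      rw [List.replicate_succ]
    have hsub : n - m - 1 = n - (m + 1) := by omega
    rw [hlenmap, Nat.sub_self, hrep, List.set_cons_zero, zero_add, hsub, List.append_assoc,
        List.singleton_append]

-- sliding-window recurrence
lemma pvW_succ (code : List Int) (lo hi i : Int) (h : lo ≤ hi) :
    pvW code lo hi i + pvTerm code (i + hi + 1) - pvTerm code (i + lo) = pvW code lo hi (i + 1) := by
  unfold pvW
  have e1 : i + 1 + lo = i + lo + 1 := by ring
  have e2 : i + 1 + hi + 1 = i + hi + 1 + 1 := by ring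
  rw [e1, e2]
  rw [PySem.List.pyRange_one_succ_right (a := i + lo + 1) (by omega)]
  rw [PySem.List.pyRange_one_cons (a := i + lo) (by omega)]
  simp [List.sum_append]
  ring

-- pvTerm has period n
lemma pvTerm_period (code : List Int) (hn : 0 < (code.length : Int)) (j : Int) :
    pvTerm code (j + (code.length : Int)) = pvTerm code j := by
  unfold pvTerm
  rw [PySem.Int.mod_eq_emod_of_pos hn, PySem.Int.mod_eq_emod_of_pos hn, Int.add_emod_right]

-- shifting a window by one full period does not change its sum
lemma pvShift (code : List Int) (hn : 0 < (code.length : Int)) (a r : Int) :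
    ((PySem.List.pyRange (a + (code.length : Int)) (a + (code.length : Int) + r) 1).map
      (pvTerm code)).sum
      = ((PySem.List.pyRange a (a + r) 1).map (pvTerm code)).sum := by
  rw [PySem.List.pyRange_one (a + (code.length : Int)) (a + (code.length : Int) + r),
      PySem.List.pyRange_one a (a + r)]
  rw [show a + (code.length : Int) + r - (a + (code.length : Int)) = a + r - a from by ring]
  rw [List.map_map, List.map_map]
  congr 1
  apply List.map_congr_left
  intro t _
  show pvTerm code (a + (code.length : Int) + (t : Int)) = pvTerm code (a + (t : Int))
  rw [show a + (code.length : Int) + (t : Int) = (a + (t : Int)) + (code.length : Int) from by ring,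
      pvTerm_period code hn]

-- any n consecutive window terms sum to the whole list
lemma pvRotation (code : List Int) (hn : 0 < (code.length : Int)) (a : Int) :
    ((PySem.List.pyRange a (a + (code.length : Int)) 1).map (pvTerm code)).sum = code.sum := by
  have hperm : ((PySem.List.pyRange a (a + (code.length : Int)) 1).map
      (fun j => PySem.Int.mod j (code.length : Int))).Perm
      (PySem.List.pyRange 0 (code.length : Int) 1) := by
    rw [List.perm_ext_iff_of_nodup]
    · intro x
      simp only [List.mem_map, PySem.List.mem_pyRange_one]
      constructor
      · rintro ⟨j, ⟨hj1, hj2⟩, rfl⟩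
        exact ⟨PySem.Int.mod_nonneg _ hn, PySem.Int.mod_lt _ hn⟩
      · rintro ⟨hx0, hxn⟩
        refine ⟨a + PySem.Int.mod (x - a) (code.length : Int),
          ⟨by have := PySem.Int.mod_nonneg (x - a) hn; omega,
           by have := PySem.Int.mod_lt (x - a) hn; omega⟩, ?_⟩
        rw [PySem.Int.mod_eq_emod_of_pos hn, PySem.Int.mod_eq_emod_of_pos hn,
            Int.add_emod, Int.emod_emod_of_dvd _ dvd_rfl, ← Int.add_emod]
        rw [show a + (x - a) = x from by ring, Int.emod_eq_of_lt hx0 hxn]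
    · refine (PySem.List.nodup_pyRange_one a (a + (code.length : Int))).map_on ?_
      intro j1 hj1 j2 hj2 heq
      rw [PySem.List.mem_pyRange_one] at hj1 hj2
      rw [PySem.Int.mod_eq_emod_of_pos hn, PySem.Int.mod_eq_emod_of_pos hn] at heq
      have hdvd : (code.length : Int) ∣ j1 - j2 := by
        have hz : (j1 - j2) % (code.length : Int) = 0 := by
          rw [Int.sub_emod, heq, sub_self, Int.zero_emod]
        exact Int.dvd_of_emod_eq_zero hz
      rcases hdvd with ⟨c, hc⟩
      have hc0 : c = 0 := by
        by_contra hne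
        rcases lt_or_gt_of_ne hne with hlt | hgt
        · nlinarith [hj1.1, hj1.2, hj2.1, hj2.2]
        · nlinarith [hj1.1, hj1.2, hj2.1, hj2.2]
      rw [hc0, mul_zero] at hc
      omega
    · exact PySem.List.nodup_pyRange_one 0 (code.length : Int)
  have hmap : (PySem.List.pyRange a (a + (code.length : Int)) 1).map (pvTerm code)
      = ((PySem.List.pyRange a (a + (code.length : Int)) 1).map
          (fun j => PySem.Int.mod j (code.length : Int))).map
          (fun t => PySem.List.pyGetD code t 0) := by
    rw [List.map_map]
    rfl
  rw [hmap, (hperm.map (fun t => PySem.List.pyGetD code t 0)).sum_eq]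
  rw [PySem.List.map_pyGetD_pyRange_zero' code 0]

-- peeling q full periods off the front of a window
lemma pvBlocks (code : List Int) (hn : 0 < (code.length : Int)) :
    ∀ (q : Nat) (a r : Int), 0 ≤ r →
    ((PySem.List.pyRange a (a + ((q : Int) * (code.length : Int) + r)) 1).map (pvTerm code)).sum
      = (q : Int) * code.sum + ((PySem.List.pyRange a (a + r) 1).map (pvTerm code)).sum := by
  intro q
  induction q with
  | zero => intro a r _; simp
  | succ q ih =>
    intro a r hr
    have hq0 : (0 : Int) ≤ (q : Int) := by positivity
    rw [PySem.List.pyRange_one_append a (a + (code.length : Int))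
          (a + (((q + 1 : Nat) : Int) * (code.length : Int) + r))
          (by omega) (by push_cast; nlinarith)]
    rw [List.map_append, List.sum_append, pvRotation code hn a]
    rw [show a + (((q + 1 : Nat) : Int) * (code.length : Int) + r)
          = (a + (code.length : Int)) + ((q : Int) * (code.length : Int) + r) from by push_cast; ring]
    rw [ih (a + (code.length : Int)) r hr, pvShift code hn a r]
    push_cast
    ring

-- B's divmod first-window sum is the i = 0 window sum
lemma pvInit (code : List Int) (m lo : Int) (hn : 0 < (code.length : Int)) (hm : 0 ≤ m) :
    PySem.Int.floordiv m (code.length : Int) * code.sum +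
      ((PySem.List.pyRange 0 (PySem.Int.mod m (code.length : Int)) 1).map
        (fun t => PySem.List.pyGetD code (PySem.Int.mod (lo + t) (code.length : Int)) 0)).sum
      = pvW code lo (lo + m - 1) 0 := by
  have hq0 : 0 ≤ PySem.Int.floordiv m (code.length : Int) := by
    rw [PySem.Int.floordiv_eq_ediv_of_pos hn]
    exact Int.ediv_nonneg hm (by omega)
  have hr0 : 0 ≤ PySem.Int.mod m (code.length : Int) := PySem.Int.mod_nonneg _ hn
  have hqr := PySem.Int.floordiv_mul_add_mod m (code.length : Int)
  unfold pvW
  rw [show 0 + (lo + m - 1) + 1 = lo + m from by ring, zero_add]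
  have hqn : (((PySem.Int.floordiv m (code.length : Int)).toNat : Int))
      = PySem.Int.floordiv m (code.length : Int) := Int.toNat_of_nonneg hq0
  rw [show lo + m
        = lo + (((PySem.Int.floordiv m (code.length : Int)).toNat : Int) * (code.length : Int)
                + PySem.Int.mod m (code.length : Int)) from by rw [hqn]; omega]
  rw [pvBlocks code hn (PySem.Int.floordiv m (code.length : Int)).toNat lo _ hr0]
  rw [hqn]
  congr 1
  rw [PySem.List.pyRange_one lo (lo + PySem.Int.mod m (code.length : Int)),
      PySem.List.pyRange_one 0 (PySem.Int.mod m (code.length : Int))]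
  rw [show lo + PySem.Int.mod m (code.length : Int) - lo
        = PySem.Int.mod m (code.length : Int) - 0 from by ring]
  rw [List.map_map, List.map_map]
  congr 1
  apply List.map_congr_left
  intro t _
  show PySem.List.pyGetD code (PySem.Int.mod (lo + (0 + (t : Int))) (code.length : Int)) 0
      = pvTerm code (lo + (t : Int))
  rw [zero_add]
  rfl

-- B's loop invariant
lemma pvBLoop (code : List Int) (lo hi : Int) (h : lo ≤ hi) (m : Nat) :
    (PySem.List.pyRange 0 (m : Int) 1).foldl
      (fun (p : List Int × Int) i =>
        (p.1 ++ [p.2], p.2 + pvTerm code (i + hi + 1) - pvTerm code (i + lo)))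
      ([], pvW code lo hi 0)
      = ((PySem.List.pyRange 0 (m : Int) 1).map (pvW code lo hi), pvW code lo hi (m : Int)) := by
  induction m with
  | zero => simp [PySem.List.pyRange_one_eq_nil (le_refl (0 : Int))]
  | succ m ih =>
    have hcast : ((m + 1 : Nat) : Int) = (m : Int) + 1 := by push_cast; ring
    rw [hcast, PySem.List.pyRange_one_succ_right (by omega), List.foldl_append, List.map_append, ih]
    simp only [List.foldl_cons, List.foldl_nil, List.map_cons, List.map_nil]
    rw [pvW_succ code lo hi (m : Int) h]

-- characterization of B
lemma pvB_char (code : List Int) (m lo : Int) (hn : 0 < (code.length : Int)) (hm : 0 < m) :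
    decrypt1AltFrom code m lo
      = (PySem.List.pyRange 0 (code.length : Int) 1).map (pvW code lo (lo + m - 1)) := by
  unfold decrypt1AltFrom decrypt1AltGo
  rw [pvInit code m lo hn (by omega)]
  rw [show (fun (p : List Int × Int) i =>
        (p.1 ++ [p.2], p.2 + PySem.List.pyGetD code (PySem.Int.mod (i + (lo + m - 1) + 1) (code.length : Int)) 0
                           - PySem.List.pyGetD code (PySem.Int.mod (i + lo) (code.length : Int)) 0))
      = (fun (p : List Int × Int) i =>
        (p.1 ++ [p.2], p.2 + pvTerm code (i + (lo + m - 1) + 1) - pvTerm code (i + lo))) from rfl]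
  rw [pvBLoop code lo (lo + m - 1) (by omega) code.length]

-- characterization of A, positive k
lemma pvA_char_pos (code : List Int) (k : Int) (hk : 0 < k) :
    decrypt1 code k = (PySem.List.pyRange 0 (code.length : Int) 1).map (pvW code 1 k) := by
  unfold decrypt1
  rw [if_neg (by omega)]
  have := pvSetFoldMap (pvW code 1 k)
    (fun ans i =>
      if k > 0 then
        (PySem.List.pyRange (i + 1) (i + 1 + k) 1).foldl (fun a j =>
          PySem.List.pySetD a i (PySem.List.pyGetD a i 0 +
            PySem.List.pyGetD code (PySem.Int.mod j (code.length : Int)) 0)) ans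
      else
        (PySem.List.pyRange (i - 1) (i - 1 + k) (-1)).foldl (fun a j =>
          let j' := if j < 0 then j + (code.length : Int) else j
          PySem.List.pySetD a i (PySem.List.pyGetD a i 0 +
            PySem.List.pyGetD code j' 0)) ans)
    code.length
    (fun a i hlen h0 h => by
      beta_reduce
      rw [if_pos hk]
      rw [pvInnerSet _ i _ a h0 (by rw [hlen]; exact h)]
      unfold pvW
      rw [show i + 1 + k = i + k + 1 from by ring]
      rfl)
    code.length (le_refl _)
  simpa using this

-- sum over A's countdown range equals the window sum (negative k)
lemma pvCountdown_sum (code : List Int) (k i : Int) :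
    ((PySem.List.pyRange (i - 1) (i - 1 + k) (-1)).map (pvTerm code)).sum
      = pvW code k (-1) i := by
  rw [PySem.List.pyRange_neg_one_eq_reverse]
  rw [show i - 1 + k + 1 = i + k from by ring, show i - 1 + 1 = i + (-1) + 1 from by ring]
  rw [List.map_reverse, List.sum_reverse]
  rfl

-- characterization of A, negative k (within Pre_)
lemma pvA_char_neg (code : List Int) (k : Int) (hk : k < 0)
    (hpre : -2 * (code.length : Int) ≤ k) :
    decrypt1 code k = (PySem.List.pyRange 0 (code.length : Int) 1).map (pvW code k (-1)) := by
  unfold decrypt1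
  rw [if_neg (by omega)]
  have := pvSetFoldMap (pvW code k (-1))
    (fun ans i =>
      if k > 0 then
        (PySem.List.pyRange (i + 1) (i + 1 + k) 1).foldl (fun a j =>
          PySem.List.pySetD a i (PySem.List.pyGetD a i 0 +
            PySem.List.pyGetD code (PySem.Int.mod j (code.length : Int)) 0)) ans
      else
        (PySem.List.pyRange (i - 1) (i - 1 + k) (-1)).foldl (fun a j =>
          let j' := if j < 0 then j + (code.length : Int) else j
          PySem.List.pySetD a i (PySem.List.pyGetD a i 0 +
            PySem.List.pyGetD code j' 0)) ans)
    code.length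
    (fun a i hlen h0 h => by
      beta_reduce
      rw [if_neg (by omega)]
      rw [PySem.List.foldl_congr_mem _ _
            (fun a' j => PySem.List.pySetD a' i (PySem.List.pyGetD a' i 0 + pvTerm code j)) a
            (by
              intro acc j hj
              rw [PySem.List.mem_pyRange_neg_one] at hj
              simp only [pvTerm_adjust code j (by omega) (by omega)])]
      rw [pvInnerSet _ i _ a h0 (by rw [hlen]; exact h)]
      rw [pvCountdown_sum code k i])
    code.length (le_refl _)
  simpa using this

-- ===== VERDICT (by name: the statement is the Claim_ definition above) =====
theorem decrypt1_spec : Claim_equal_decrypt1 := by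
  intro code k _ hpre
  unfold Spec_decrypt1 decrypt1_alt
  by_cases hk : k = 0
  · rw [if_pos (Or.inr hk)]
    unfold decrypt1
    rw [if_pos hk]
  · by_cases hn : code.length = 0
    · rw [if_pos (Or.inl hn)]
      unfold decrypt1
      rw [if_neg hk, hn]
      simp [PySem.List.pyRange_one_eq_nil (le_refl (0 : Int))]
    · rw [if_neg (by tauto)]
      have hn' : 0 < (code.length : Int) := by
        have : 0 < code.length := Nat.pos_of_ne_zero hn
        exact_mod_cast this
      by_cases hpos : k > 0
      · rw [if_pos hpos, pvA_char_pos code k hpos,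
            pvB_char code |k| 1 hn' (by rw [abs_of_pos hpos]; omega)]
        rw [show (1 : Int) + |k| - 1 = k from by rw [abs_of_pos hpos]; ring]
      · have hneg : k < 0 := by omega
        have hpre' : -2 * (code.length : Int) ≤ k := by
          rcases hpre with h | h
          · exact absurd (by simp [h]) hn
          · exact h
        rw [if_neg hpos, pvA_char_neg code k hneg hpre',
            pvB_char code |k| k hn' (by rw [abs_of_neg hneg]; omega)]
        rw [show k + |k| - 1 = -1 from by rw [abs_of_neg hneg]; ring]
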